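-- pv_equiv track=rewrite | github.com/AYAN766666/Hackathon_5_The_CRM_Digital_FTE_Factory_Final | backend/services/knowledge_base_service.py | _find_sections_with_word
-- ===== SOURCE A (Python) =====
-- from typing import List, Dict, Any, Optional
--
-- def _find_sections_with_word(content: str, word: str) -> List[tuple]:
--     """Find sections containing a specific word
--
--     Args:
--         content: Document content
--         word: Word to search for
--
--     Returns:
--         List of (section_type, section_title) tuples
--     """
--     sections = []
--     lines = content.split('\n')
--
--     current_section = "Introduction"
--
--     for line in lines:
--         if line.startswith('###'):
--             current_section = line.replace('#', '').strip()
--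
--         if word.lower() in line.lower():
--             sections.append(("section", current_section))
--
--     return sections
-- ===== SOURCE B (Python) =====
-- from typing import List
--
--
-- def _find_sections_with_word(content: str, word: str) -> List[tuple]:
--     """Parse the document into (title, lines) groups first, then search them."""
--     # Phase 1: partition the lines into sections. A '###' header line closes the
--     # current group and opens a new one that contains the header line itself.
--     groups = []
--     title, buf = "Introduction", []
--     for line in content.split('\n'):
--         if line.startswith('###'):
--             groups.append((title, buf))
--             title, buf = line.replace('#', '').strip(), [line]
--         else:
--             buf.append(line)
--     groups.append((title, buf))
--     # Phase 2: search each group's lines for the word.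
--     needle = word.lower()
--     return [("section", t) for t, ls in groups for l in ls if needle in l.lower()]
-- ===== Notes on version B (the rewrite author's own statement) =====
-- stated objective: alternative
-- what changed: Replaces A's single state-tracking scan with a parse-then-search decomposition: a first pass partitions the lines into (title, lines) section groups (a header line starts and belongs to its new group), and a second pass scans the groups emitting ('section', title) for every matching line; word.lower() is computed once instead of per line.
import Mathlib
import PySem

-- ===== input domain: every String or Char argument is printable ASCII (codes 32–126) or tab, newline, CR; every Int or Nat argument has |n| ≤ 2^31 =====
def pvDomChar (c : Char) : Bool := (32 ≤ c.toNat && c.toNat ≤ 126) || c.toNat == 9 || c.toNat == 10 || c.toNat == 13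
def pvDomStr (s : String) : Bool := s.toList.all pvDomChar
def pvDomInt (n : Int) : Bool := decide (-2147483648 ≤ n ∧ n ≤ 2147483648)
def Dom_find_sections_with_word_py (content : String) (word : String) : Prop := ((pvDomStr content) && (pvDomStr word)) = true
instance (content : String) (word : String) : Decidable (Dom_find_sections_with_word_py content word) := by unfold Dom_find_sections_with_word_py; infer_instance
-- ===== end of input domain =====

-- B replaces A's single state-tracking scan with a parse-into-(title,lines)-groups pass
-- followed by a search pass over the groups (alternative decomposition, same cost).


-- ===== PORT A =====
-- the loop body of A: update current_section on a '###' header, then (possibly) append a match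
def pvStepA (word : String) (st : List (String × String) × String) (line : String) :
    List (String × String) × String :=
  let cur := if PySem.Str.startswith line "###" = true
             then PySem.Str.strip (PySem.Str.replace line "#" "") else st.2
  if PySem.Str.isIn (PySem.Str.lower word) (PySem.Str.lower line) = true
  then (st.1 ++ [(("section" : String), cur)], cur) else (st.1, cur)

def find_sections_with_word_py (content : String) (word : String) : List (String × String) :=
  let lines := (PySem.Str.split? content "\n").getD []   -- content.split('\n'); sep ≠ "" so never none
  (lines.foldl (pvStepA word) ([], "Introduction")).1

-- ===== PORT B =====
-- phase-1 loop body: a '###' header line flushes the current group and opens a new one containing itself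
def pvStepP (st : List (String × List String) × String × List String) (line : String) :
    List (String × List String) × String × List String :=
  if PySem.Str.startswith line "###" = true
  then (st.1 ++ [(st.2.1, st.2.2)], PySem.Str.strip (PySem.Str.replace line "#" ""), [line])
  else (st.1, st.2.1, st.2.2 ++ [line])

def pvParse (lines : List String) : List (String × List String) :=
  let st := lines.foldl pvStepP ([], "Introduction", [])
  st.1 ++ [(st.2.1, st.2.2)]

def find_sections_with_word_py_alt (content : String) (word : String) : List (String × String) :=
  let lines := (PySem.Str.split? content "\n").getD []   -- content.split('\n')
  let needle := PySem.Str.lower word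
  (pvParse lines).flatMap (fun g =>
    (g.2.filter (fun l => PySem.Str.isIn needle (PySem.Str.lower l))).map
      (fun _ => (("section" : String), g.1)))

-- ===== PRECONDITION & SPEC =====
def Spec_find_sections_with_word_py (content : String) (word : String) (out : List (String × String)) : Prop := out = find_sections_with_word_py_alt content word
instance (content : String) (word : String) (out : List (String × String)) : Decidable (Spec_find_sections_with_word_py content word out) := by unfold Spec_find_sections_with_word_py; infer_instance

-- ===== CLAIM (what is proved, stated in full; the proofs are below) =====
def Claim_equal_find_sections_with_word_py : Prop := ∀ (content : String) (word : String), Dom_find_sections_with_word_py content word → Spec_find_sections_with_word_py content word (find_sections_with_word_py content word)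

-- ===== LEMMAS AND PROOFS =====

-- phase 2 restricted to one group, named for the proofs (defeq to the lambda in the B port)
def pvSearch (word : String) (g : String × List String) : List (String × String) :=
  (g.2.filter (fun l => PySem.Str.isIn (PySem.Str.lower word) (PySem.Str.lower l))).map
    (fun _ => (("section" : String), g.1))

lemma pvSearch_nil (word t : String) : pvSearch word (t, []) = [] := by simp [pvSearch]

lemma pvSearch_append (word t : String) (xs ys : List String) :
    pvSearch word (t, xs ++ ys) = pvSearch word (t, xs) ++ pvSearch word (t, ys) := by
  simp [pvSearch, List.filter_append]

lemma pvSearch_single (word t l : String) :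
    pvSearch word (t, [l])
      = if PySem.Str.isIn (PySem.Str.lower word) (PySem.Str.lower l) = true
        then [(("section" : String), t)] else [] := by
  rcases Bool.eq_false_or_eq_true
      (PySem.Chars.isIn (PySem.Chars.lower word.toList) (PySem.Chars.lower l.toList)) with hm | hm <;>
    simp [pvSearch, hm]

-- A's step: the accumulator factors out
lemma stepA_acc (word : String) (s : List (String × String) × String) (line : String) :
    pvStepA word s line
      = (s.1 ++ (pvStepA word ([], s.2) line).1, (pvStepA word ([], s.2) line).2) := by
  simp only [pvStepA]
  split <;> simp

-- A's fold: the accumulator factors out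
lemma foldA_acc (word : String) (lines : List String) (s : List (String × String) × String) :
    lines.foldl (pvStepA word) s
      = (s.1 ++ (lines.foldl (pvStepA word) ([], s.2)).1,
         (lines.foldl (pvStepA word) ([], s.2)).2) := by
  induction lines generalizing s with
  | nil => simp
  | cons l ls ih =>
    simp only [List.foldl_cons]
    rw [ih (pvStepA word s l), ih (pvStepA word ([], s.2) l), stepA_acc]
    simp [List.append_assoc]

-- B's phase 2 over a partially built phase-1 state decomposes
lemma parse_search (word : String) (lines : List String) (gs : List (String × List String))
    (t : String) (buf : List String) :
    (((lines.foldl pvStepP (gs, t, buf)).1 ++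
        [((lines.foldl pvStepP (gs, t, buf)).2.1, (lines.foldl pvStepP (gs, t, buf)).2.2)]).flatMap
        (pvSearch word))
      = gs.flatMap (pvSearch word) ++ pvSearch word (t, buf) ++
        (((lines.foldl pvStepP ([], t, [])).1 ++
          [((lines.foldl pvStepP ([], t, [])).2.1, (lines.foldl pvStepP ([], t, [])).2.2)]).flatMap
          (pvSearch word)) := by
  induction lines generalizing gs t buf with
  | nil => simp [pvSearch_nil]
  | cons l ls ih =>
    simp only [List.foldl_cons]
    by_cases hh : PySem.Str.startswith l "###" = true
    · simp only [pvStepP, hh, if_pos, List.nil_append]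
      rw [ih (gs ++ [(t, buf)]), ih [(t, [])]]
      simp [pvSearch_nil, List.append_assoc]
    · have hh' : PySem.Str.startswith l "###" = false := by simpa using hh
      simp only [pvStepP, hh', Bool.false_eq_true, if_false, List.nil_append]
      rw [ih gs t (buf ++ [l]), ih [] t [l]]
      simp [pvSearch_append, List.append_assoc]

-- main induction: A's scan equals parse-then-search, for any starting title
lemma main_loop (word : String) (lines : List String) (t : String) :
    (lines.foldl (pvStepA word) ([], t)).1
      = (((lines.foldl pvStepP ([], t, [])).1 ++
          [((lines.foldl pvStepP ([], t, [])).2.1, (lines.foldl pvStepP ([], t, [])).2.2)]).flatMap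
          (pvSearch word)) := by
  induction lines generalizing t with
  | nil => simp [pvSearch_nil]
  | cons l ls ih =>
    simp only [List.foldl_cons]
    by_cases hh : PySem.Str.startswith l "###" = true
    · replace hh : PySem.Chars.startswith l.toList ['#', '#', '#'] = true := by simpa using hh
      have hP : pvStepP (([] : List (String × List String)), t, ([] : List String)) l
          = ([(t, [])], PySem.Str.strip (PySem.Str.replace l "#" ""), [l]) := by
        simp [pvStepP, hh]
      have hA : pvStepA word (([] : List (String × String)), t) l
          = ((if PySem.Str.isIn (PySem.Str.lower word) (PySem.Str.lower l) = true
              then [(("section" : String), PySem.Str.strip (PySem.Str.replace l "#" ""))] else []),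
             PySem.Str.strip (PySem.Str.replace l "#" "")) := by
        rcases Bool.eq_false_or_eq_true
            (PySem.Chars.isIn (PySem.Chars.lower word.toList) (PySem.Chars.lower l.toList)) with hm | hm <;>
          simp [pvStepA, hh, hm]
      rw [hA, hP, foldA_acc, parse_search, ih]
      simp [pvSearch_nil, pvSearch_single]
    · replace hh : PySem.Chars.startswith l.toList ['#', '#', '#'] = false := by simpa using hh
      have hP : pvStepP (([] : List (String × List String)), t, ([] : List String)) l
          = ([], t, [l]) := by
        simp [pvStepP, hh]
      have hA : pvStepA word (([] : List (String × String)), t) l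
          = ((if PySem.Str.isIn (PySem.Str.lower word) (PySem.Str.lower l) = true
              then [(("section" : String), t)] else []), t) := by
        rcases Bool.eq_false_or_eq_true
            (PySem.Chars.isIn (PySem.Chars.lower word.toList) (PySem.Chars.lower l.toList)) with hm | hm <;>
          simp [pvStepA, hh, hm]
      rw [hA, hP, foldA_acc, parse_search, ih]
      simp [pvSearch_single]

-- ===== VERDICT (by name: the statement is the Claim_ definition above) =====
theorem find_sections_with_word_py_spec : Claim_equal_find_sections_with_word_py := by
  intro content word _
  show find_sections_with_word_py content word = find_sections_with_word_py_alt content word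
  exact main_loop word ((PySem.Str.split? content "\n").getD []) "Introduction"
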